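-- pv_equiv track=rewrite | github.com/gregojam/college-coursework | B351/HoldEm/src/checkHand.py | bestOfAKind
-- ===== SOURCE A (Python) =====
-- def rankDict(hand):
--     tmpHand = []
--     for i in range(len(hand)):
--         tmpHand.append(hand[i] % 13)
--
--     rDict= {}
--     for i in range(len(hand)):
--         if tmpHand[i] in rDict:
--             rDict[tmpHand[i]].append(hand[i])
--         else:
--             rDict[tmpHand[i]] = [hand[i]]
--     return rDict
--
-- def bestOfAKind(hand):
--     rDict = rankDict(hand)
--     ranks = sorted(rDict, key=lambda x: (len(rDict[x]), x), reverse= True)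
--
--     tmpHand = []
--     for rank in ranks:
--         for card in rDict[rank]:
--             tmpHand.insert(0, card)
--             if len(tmpHand) == 5:
--                 return tmpHand
-- ===== SOURCE B (Python) =====
-- def bestOfAKind(hand):
--     cnt = {}
--     for c in hand:
--         r = c % 13
--         cnt[r] = cnt.get(r, 0) + 1
--     seq = sorted(hand, key=lambda c: (cnt[c % 13], c % 13), reverse=True)
--     if len(seq) < 5:
--         return None
--     return seq[:5][::-1]
-- ===== Notes on version B (the rewrite author's own statement) =====
-- stated objective: alternative
-- what changed: A groups cards into a rank->list dict, sorts the rank keys by (count, rank) descending and fills a result by front-insertion with an early return at 5 cards; B only counts ranks, stable-sorts the cards themselves by (rank count, rank) descending in one pass and returns the first five reversed via slicing.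
-- outside the precondition, e.g. on bestOfAKind([1, 2, 3, 4]): A returns None, B returns None
import Mathlib
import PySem

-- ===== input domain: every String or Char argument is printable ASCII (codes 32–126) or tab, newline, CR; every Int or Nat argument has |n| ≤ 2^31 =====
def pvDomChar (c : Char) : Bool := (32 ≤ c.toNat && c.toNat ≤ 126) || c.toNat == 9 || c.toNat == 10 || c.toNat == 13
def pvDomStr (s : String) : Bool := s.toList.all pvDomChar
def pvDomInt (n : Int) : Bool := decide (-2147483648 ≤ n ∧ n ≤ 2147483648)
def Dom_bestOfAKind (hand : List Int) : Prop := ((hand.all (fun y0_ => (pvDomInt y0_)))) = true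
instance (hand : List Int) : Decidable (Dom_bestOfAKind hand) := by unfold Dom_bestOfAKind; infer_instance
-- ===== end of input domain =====

-- B replaces A's rank-bucket dict + front-insertion early-return loop by one stable
-- descending sort of the cards themselves keyed by (rank count, rank), then slices;
-- objective: alternative (equal value, different algorithm). Return-value equivalence only.


-- ===== PORT A =====
-- hand[i] % 13 (Python %: floor, sign of the divisor)
def pvRank (c : Int) : Int := PySem.Int.mod c 13

-- rankDict(hand): both index loops run over range(len(hand)), so the pyGetD default 0 is never used
def pvRankDict (hand : List Int) : PySem.Dict Int (List Int) :=
  let tmpHand : List Int :=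
    (PySem.List.pyRange 0 (PySem.List.len hand)).foldl
      (fun acc i => acc ++ [pvRank (PySem.List.pyGetD hand i 0)]) []
  (PySem.List.pyRange 0 (PySem.List.len hand)).foldl
    (fun d i =>
      let r := PySem.List.pyGetD tmpHand i 0
      let c := PySem.List.pyGetD hand i 0
      -- if tmpHand[i] in rDict: rDict[tmpHand[i]].append(hand[i]) else: rDict[tmpHand[i]] = [hand[i]]
      if d.contains r then d.modify r [] (fun l => l ++ [c]) else d.insert r [c])
    PySem.Dict.empty

-- inner 'for card in rDict[rank]': tmpHand.insert(0, card); early return at length 5 (.inl)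
def pvGoCards (acc : List Int) : List Int → (List Int) ⊕ (List Int)
  | [] => Sum.inr acc
  | c :: cs =>
    let acc' := c :: acc
    if acc'.length = 5 then Sum.inl acc' else pvGoCards acc' cs

-- outer 'for rank in ranks'; falling through the loop is Python's implicit None (Option.none)
def pvGoRanks (d : PySem.Dict Int (List Int)) (acc : List Int) : List Int → Option (List Int)
  | [] => none
  | r :: rs =>
    match pvGoCards acc (d.getD r []) with
    | Sum.inl res => some res
    | Sum.inr acc' => pvGoRanks d acc' rs

def bestOfAKind (hand : List Int) : List Int :=
  let rDict := pvRankDict hand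
  -- sorted(rDict, key=lambda x: (len(rDict[x]), x), reverse=True); x is always a key of rDict
  let ranks := PySem.List.sorted2 rDict.keys
      (fun x => ((rDict.getD x []).length : Int)) (fun x => x) true
  -- Python returns None when the loop falls through (hand shorter than 5); excluded by Pre_
  (pvGoRanks rDict [] ranks).getD []

-- ===== PORT B =====
def bestOfAKind_alt (hand : List Int) : List Int :=
  let cnt : PySem.Dict Int Int :=
    hand.foldl (fun d c =>
      d.insert (PySem.Int.mod c 13) (d.getD (PySem.Int.mod c 13) 0 + 1)) PySem.Dict.empty
  let seq := PySem.List.sorted2 hand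
      (fun c => cnt.getD (PySem.Int.mod c 13) 0) (fun c => PySem.Int.mod c 13) true
  if seq.length < 5 then []  -- Python B returns None here; excluded by Pre_
  else (PySem.List.slice? (PySem.List.slice seq none (some 5)) none none (-1)).getD []

-- ===== PRECONDITION & SPEC =====
-- With fewer than 5 cards both Pythons return None, which is not a value of the declared
-- list type; Pre_ excludes exactly those hands.
def Pre_bestOfAKind (hand : List Int) : Prop := 5 ≤ hand.length
instance (hand : List Int) : Decidable (Pre_bestOfAKind hand) := by
  unfold Pre_bestOfAKind; infer_instance
def pvWitness_bestOfAKind : List Int := [1, 2, 3, 4, 5]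
def Spec_bestOfAKind (hand : List Int) (out : List Int) : Prop := out = bestOfAKind_alt hand
instance (hand : List Int) (out : List Int) : Decidable (Spec_bestOfAKind hand out) := by
  unfold Spec_bestOfAKind; infer_instance

-- ===== CLAIM (what is proved, stated in full; the proofs are below) =====
def Claim_equal_bestOfAKind : Prop :=
  ∀ (hand : List Int), Dom_bestOfAKind hand → Pre_bestOfAKind hand →
    Spec_bestOfAKind hand (bestOfAKind hand)

-- ===== LEMMAS AND PROOFS =====
def pvW (hand : List Int) (r : Int) : Int := ((hand.map pvRank).count r : Int)
def pvBucket (hand : List Int) (r : Int) : List Int := hand.filter (fun c => pvRank c == r)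
-- strict linear order on ranks used by both sort keys
def pvLtP (w : Int → Int) (a b : Int) : Prop := w a < w b ∨ (w a = w b ∧ a < b)
-- the 'before' test sorted2 … true uses (argument order: new element x, listed element y)
def pvBef (w key : Int → Int) (x y : Int) : Bool :=
  decide (w (key y) < w (key x)) || (!decide (w (key x) < w (key y)) && decide (key y < key x))
-- Bool form of pvLtP
def pvLtb (w : Int → Int) (a b : Int) : Bool :=
  decide (w a < w b) || (decide (w a = w b) && decide (a < b))
-- the canonical strictly descending list of distinct ranks
def pvDs (hand : List Int) : List Int :=
  (PySem.Set.ofList (hand.map pvRank)).mergeSort (fun a b => !pvLtb (pvW hand) a b)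

lemma pvBef_iff (w key : Int → Int) (x y : Int) :
    pvBef w key x y = true ↔ pvLtP w (key y) (key x) := by
  simp [pvBef, pvLtP]; omega

lemma pv_sorted2_eq (w key : Int → Int) (xs : List Int) :
    PySem.List.sorted2 xs (fun c => w (key c)) (fun c => key c) true
      = xs.foldl (fun acc c => PySem.List.insertBy (pvBef w key) c acc) [] := rfl

lemma pv_insertBy_skip (bef : Int → Int → Bool) (x : Int) :
    ∀ (pre rest : List Int), (∀ y ∈ pre, bef x y = false) →
      PySem.List.insertBy bef x (pre ++ rest) = pre ++ PySem.List.insertBy bef x rest := by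
  intro pre
  induction pre with
  | nil => simp
  | cons p ps ih =>
    intro rest h
    have hp : bef x p = false := h p (by simp)
    simp [PySem.List.insertBy, hp]
    exact ih rest (fun y hy => h y (by simp [hy]))

lemma pv_insertBy_all (bef : Int → Int → Bool) (x : Int) :
    ∀ (ys : List Int), (∀ y ∈ ys, bef x y = true) →
      PySem.List.insertBy bef x ys = x :: ys := by
  intro ys h
  cases ys with
  | nil => rfl
  | cons y ys => simp [PySem.List.insertBy, h y (by simp)]

lemma pv_insert_grouped (w key : Int → Int) (x : Int) :
    ∀ (ds : List Int) (F : Int → List Int), ds.Nodup →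
      ds.Pairwise (fun a b => pvLtP w b a) → key x ∈ ds →
      (∀ k ∈ ds, ∀ y ∈ F k, key y = k) →
      PySem.List.insertBy (pvBef w key) x (ds.flatMap F)
        = ds.flatMap (fun k => F k ++ if key x == k then [x] else []) := by
  intro ds
  induction ds with
  | nil => intro F _ _ hx _; simp at hx
  | cons k ds ih =>
    intro F hnd hdesc hx hF
    have hk_not_mem : k ∉ ds := (List.nodup_cons.mp hnd).1
    have hdesc' := (List.pairwise_cons.mp hdesc).2
    have hlt_all : ∀ b ∈ ds, pvLtP w b k := (List.pairwise_cons.mp hdesc).1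
    by_cases hkx : key x = k
    · -- x joins the group of k: skip F k (ties), then x goes in front of everything smaller
      have hskip : ∀ y ∈ F k, pvBef w key x y = false := by
        intro y hy
        have hky : key y = k := hF k (by simp) y hy
        rw [← Bool.not_eq_true, pvBef_iff, hky, hkx]
        simp [pvLtP]
      have hall : ∀ y ∈ ds.flatMap F, pvBef w key x y = true := by
        intro y hy
        obtain ⟨k', hk', hyk'⟩ := List.mem_flatMap.mp hy
        have hky : key y = k' := hF k' (by simp [hk']) y hyk'
        rw [pvBef_iff, hky, hkx]
        exact hlt_all k' hk'
      rw [List.flatMap_cons, pv_insertBy_skip _ _ _ _ hskip, pv_insertBy_all _ _ _ hall]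
      rw [List.flatMap_cons]
      have hif : (if key x == k then [x] else []) = [x] := by simp [hkx]
      rw [hif]
      have : ds.flatMap (fun k' => F k' ++ if key x == k' then [x] else []) = ds.flatMap F := by
        apply List.flatMap_congr
        intro k' hk'
        have : key x ≠ k' := by rintro rfl; exact hk_not_mem (hkx ▸ hk')
        simp [this]
      rw [this]; simp
    · -- x belongs further down: skip the whole group of k
      have hx' : key x ∈ ds := by
        rcases List.mem_cons.mp hx with h | h
        · exact absurd h hkx
        · exact h
      have hskip : ∀ y ∈ F k, pvBef w key x y = false := by
        intro y hy
        have hky : key y = k := hF k (by simp) y hy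
        have hxk : pvLtP w (key x) k := hlt_all _ hx'
        rw [← Bool.not_eq_true, pvBef_iff, hky]
        simp only [pvLtP] at hxk ⊢
        omega
      rw [List.flatMap_cons, pv_insertBy_skip _ _ _ _ hskip,
        ih F (List.nodup_cons.mp hnd).2 hdesc' hx' (fun k' hk' => hF k' (by simp [hk']))]
      rw [List.flatMap_cons]
      have hif : (if key x == k then [x] else []) = [] := by simp [hkx]
      rw [hif]; simp

lemma pv_core (w key : Int → Int) (ds : List Int) (hnd : ds.Nodup)
    (hdesc : ds.Pairwise (fun a b => pvLtP w b a)) :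
    ∀ xs : List Int, (∀ c ∈ xs, key c ∈ ds) →
      PySem.List.sorted2 xs (fun c => w (key c)) (fun c => key c) true
        = ds.flatMap (fun k => xs.filter (fun c => key c == k)) := by
  intro xs
  induction xs using List.reverseRecOn with
  | nil => intro _; simp [pv_sorted2_eq]
  | append_singleton xs x ih =>
    intro hmem
    have hxs : ∀ c ∈ xs, key c ∈ ds := fun c hc => hmem c (by simp [hc])
    rw [pv_sorted2_eq, List.foldl_append, List.foldl_cons, List.foldl_nil,
      ← pv_sorted2_eq, ih hxs,
      pv_insert_grouped w key x ds _ hnd hdesc (hmem x (by simp))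
        (fun k _ y hy => by simpa using (List.mem_filter.mp hy).2)]
    apply List.flatMap_congr
    intro k _
    rw [List.filter_append]
    by_cases hxk : key x = k
    · simp [List.filter, hxk]
    · have hb : (key x == k) = false := by simp [hxk]
      simp [List.filter, hb]

-- ===== A's dict =====
lemma pv_rankDict_eq (hand : List Int) :
    pvRankDict hand
      = (hand.map (fun c => (pvRank c, c))).foldl
          (fun d p => d.modify p.1 [] (fun l => l ++ [p.2])) PySem.Dict.empty := by
  unfold pvRankDict
  have htmp :
      (PySem.List.pyRange 0 (PySem.List.len hand)).foldl
        (fun acc i => acc ++ [pvRank (PySem.List.pyGetD hand i 0)]) []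
        = hand.map pvRank := by
    have h := PySem.List.foldl_pyRange_pyGetD hand 0
      (fun acc c => acc ++ [pvRank c]) ([] : List Int) le_rfl
    simp only [Int.toNat_zero, List.drop_zero] at h
    rw [h, PySem.List.foldl_append_singleton_eq_map pvRank hand []]
    simp
  rw [htmp]
  have hget : ∀ i : Int, PySem.List.pyGetD (hand.map pvRank) i 0
      = pvRank (PySem.List.pyGetD hand i 0) := by
    intro i
    have h0 : (0 : Int) = pvRank 0 := by decide
    conv_lhs => rw [h0, PySem.List.pyGetD_map]
  have hbody :
      (PySem.List.pyRange 0 (PySem.List.len hand)).foldl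
        (fun d i =>
          let r := PySem.List.pyGetD (hand.map pvRank) i 0
          let c := PySem.List.pyGetD hand i 0
          if d.contains r then d.modify r [] (fun l => l ++ [c]) else d.insert r [c])
        PySem.Dict.empty
      = hand.foldl
          (fun d c =>
            if d.contains (pvRank c) then d.modify (pvRank c) [] (fun l => l ++ [c])
            else d.insert (pvRank c) [c]) PySem.Dict.empty := by
    have h := PySem.List.foldl_pyRange_pyGetD hand 0
      (fun d c =>
        if d.contains (pvRank c) then d.modify (pvRank c) [] (fun l => l ++ [c])
        else d.insert (pvRank c) [c]) PySem.Dict.empty le_rfl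
    simp only [Int.toNat_zero, List.drop_zero] at h
    rw [← h]
    apply PySem.List.foldl_congr_mem
    intro d i _
    simp only [hget]
  rw [hbody, List.foldl_map]
  apply PySem.List.foldl_congr_mem
  intro d c _
  by_cases h : d.contains (pvRank c)
  · simp [h]
  · simp only [h]
    simp [PySem.Dict.modify, PySem.Dict.getD_of_not_contains d [] (by simpa using h)]

lemma pv_bucket (hand : List Int) (r : Int) :
    (pvRankDict hand).getD r [] = pvBucket hand r := by
  rw [pv_rankDict_eq, PySem.Dict.getD_foldl_modify_append]
  simp only [PySem.Dict.getD_empty, List.nil_append]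
  rw [List.filter_map, List.map_map]
  simp [pvBucket, Function.comp_def]

lemma pv_keys (hand : List Int) :
    (pvRankDict hand).keys = PySem.Set.ofList (hand.map pvRank) := by
  rw [pv_rankDict_eq]
  rw [PySem.Dict.keys_foldl_modify_key (hand.map (fun c => (pvRank c, c)))
    (fun p => p.1) [] (fun _ p l => l ++ [p.2]) PySem.Dict.empty]
  simp [PySem.Set.update_nil_left, List.map_map, Function.comp_def]

lemma pv_bucket_len (hand : List Int) (r : Int) :
    ((pvBucket hand r).length : Int) = pvW hand r := by
  simp [pvBucket, pvW, List.count, List.countP_map, ← List.countP_eq_length_filter,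
    Function.comp_def]

-- ===== the descending rank list =====
lemma pv_ds_perm (hand : List Int) :
    (pvDs hand).Perm (PySem.Set.ofList (hand.map pvRank)) := List.mergeSort_perm _ _

lemma pv_ds_nodup (hand : List Int) : (pvDs hand).Nodup :=
  (pv_ds_perm hand).nodup_iff.mpr (PySem.Set.nodup_ofList _)

lemma pv_ds_mem (hand : List Int) (r : Int) :
    r ∈ pvDs hand ↔ r ∈ hand.map pvRank := by
  rw [(pv_ds_perm hand).mem_iff, PySem.Set.mem_ofList]

lemma pvLtb_iff (w : Int → Int) (a b : Int) :
    pvLtb w a b = true ↔ (w a < w b ∨ (w a = w b ∧ a < b)) := by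
  simp [pvLtb]

lemma pv_ds_desc (hand : List Int) :
    (pvDs hand).Pairwise (fun a b => pvLtP (pvW hand) b a) := by
  have hiff : ∀ a b : Int, (!pvLtb (pvW hand) a b) = true
      ↔ ¬ (pvW hand a < pvW hand b ∨ (pvW hand a = pvW hand b ∧ a < b)) := by
    intro a b
    rw [Bool.not_eq_true', ← Bool.not_eq_true, pvLtb_iff]
  have hsorted : (pvDs hand).Pairwise (fun a b => (!pvLtb (pvW hand) a b) = true) := by
    apply List.pairwise_mergeSort
    · intro a b c hab hbc
      rw [hiff] at *
      omega
    · intro a b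
      cases hb : pvLtb (pvW hand) a b with
      | false => simp
      | true =>
        have h' := (pvLtb_iff (pvW hand) a b).mp hb
        have hba : (!pvLtb (pvW hand) b a) = true := by rw [hiff]; omega
        simp [hba]
  have hne := pv_ds_nodup hand
  apply (hsorted.and hne).imp
  intro a b hab
  obtain ⟨h1, h2⟩ := hab
  rw [hiff] at h1
  simp only [ne_eq] at h2
  simp only [pvLtP]
  omega

-- ===== A's final loop =====
lemma pv_goCards_spec : ∀ (cs acc : List Int), acc.length < 5 →
    pvGoCards acc cs =
      if 5 ≤ acc.length + cs.length then Sum.inl ((cs.take (5 - acc.length)).reverse ++ acc)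
      else Sum.inr (cs.reverse ++ acc) := by
  intro cs
  induction cs with
  | nil =>
    intro acc h
    simp only [pvGoCards, List.length_nil, Nat.add_zero, List.take_nil, List.reverse_nil,
      List.nil_append]
    rw [if_neg (by omega)]
  | cons c cs ih =>
    intro acc h
    simp only [pvGoCards, List.length_cons]
    by_cases h5 : acc.length + 1 = 5
    · rw [if_pos h5, if_pos (by omega)]
      have ht : 5 - acc.length = 1 := by omega
      rw [ht]
      simp
    · rw [if_neg h5, ih (c :: acc) (by simp only [List.length_cons]; omega)]
      simp only [List.length_cons]
      by_cases hge : 5 ≤ acc.length + (cs.length + 1)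
      · rw [if_pos (by omega), if_pos (by omega)]
        have hsub : 5 - acc.length = (5 - (acc.length + 1)) + 1 := by omega
        rw [hsub, List.take_succ_cons]
        simp
      · rw [if_neg (by omega), if_neg (by omega)]
        simp

lemma pv_goRanks_spec (d : PySem.Dict Int (List Int)) :
    ∀ (rs : List Int) (acc : List Int), acc.length < 5 →
      pvGoRanks d acc rs =
        if 5 ≤ acc.length + (rs.flatMap (fun r => d.getD r [])).length
        then some (((rs.flatMap (fun r => d.getD r [])).take (5 - acc.length)).reverse ++ acc)
        else none := by
  intro rs
  induction rs with
  | nil =>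
    intro acc h
    simp only [pvGoRanks, List.flatMap_nil, List.length_nil, Nat.add_zero]
    rw [if_neg (by omega)]
  | cons r rs ih =>
    intro acc h
    simp only [pvGoRanks, List.flatMap_cons]
    rw [pv_goCards_spec (d.getD r []) acc h]
    have hlap := List.length_append (as := d.getD r []) (bs := rs.flatMap (fun r => d.getD r []))
    by_cases hge : 5 ≤ acc.length + (d.getD r []).length
    · rw [if_pos hge]
      rw [if_pos (by omega)]
      rw [List.take_append]
      have hz : 5 - acc.length - (d.getD r []).length = 0 := by omega
      rw [hz, List.take_zero, List.append_nil]
    · rw [if_neg hge]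
      show pvGoRanks d ((d.getD r []).reverse ++ acc) rs = _
      rw [ih ((d.getD r []).reverse ++ acc)
        (by rw [List.length_append, List.length_reverse]; omega)]
      rw [List.length_append, List.length_reverse]
      by_cases hT : 5 ≤ acc.length + ((d.getD r []).length
          + (rs.flatMap (fun r => d.getD r [])).length)
      · rw [if_pos (by omega), if_pos (by omega)]
        rw [List.take_append,
          List.take_of_length_le (l := d.getD r []) (i := 5 - acc.length) (by omega)]
        have hsub : 5 - ((d.getD r []).length + acc.length)
            = 5 - acc.length - (d.getD r []).length := by omega
        rw [hsub, List.reverse_append, List.append_assoc]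
      · rw [if_neg (by omega), if_neg (by omega)]

-- assembled A and B values
lemma pv_ranks_eq (hand : List Int) :
    PySem.List.sorted2 (pvRankDict hand).keys
      (fun x => (((pvRankDict hand).getD x []).length : Int)) (fun x => x) true
      = pvDs hand := by
  have hcore : PySem.List.sorted2 (PySem.Set.ofList (hand.map pvRank))
      (fun x : Int => pvW hand x) (fun x : Int => x) true
      = (pvDs hand).flatMap
          (fun k => (PySem.Set.ofList (hand.map pvRank)).filter (fun c => c == k)) :=
    pv_core (pvW hand) (fun x : Int => x) (pvDs hand) (pv_ds_nodup hand) (pv_ds_desc hand)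
      (PySem.Set.ofList (hand.map pvRank))
      (fun c hc => (pv_ds_mem hand c).mpr ((PySem.Set.mem_ofList _ _).mp hc))
  have hsingle : ∀ k ∈ pvDs hand,
      (PySem.Set.ofList (hand.map pvRank)).filter (fun c => c == k) = [k] := by
    intro k hk
    have hmem : k ∈ PySem.Set.ofList (hand.map pvRank) := by
      rw [PySem.Set.mem_ofList]; exact (pv_ds_mem hand k).mp hk
    have h1 : List.count k (PySem.Set.ofList (hand.map pvRank)) = 1 :=
      List.count_eq_one_of_mem (PySem.Set.nodup_ofList _) hmem
    rw [List.filter_beq k, h1, List.replicate_one]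
  calc PySem.List.sorted2 (pvRankDict hand).keys
        (fun x => (((pvRankDict hand).getD x []).length : Int)) (fun x => x) true
      = PySem.List.sorted2 (PySem.Set.ofList (hand.map pvRank))
          (fun x => (((pvRankDict hand).getD x []).length : Int)) (fun x => x) true := by
        rw [pv_keys]
    _ = PySem.List.sorted2 (PySem.Set.ofList (hand.map pvRank))
          (fun x : Int => pvW hand x) (fun x : Int => x) true :=
        congrArg (fun k1 : Int → Int => PySem.List.sorted2
            (PySem.Set.ofList (hand.map pvRank)) k1 (fun x : Int => x) true)
          (funext (fun x => by rw [pv_bucket, pv_bucket_len]))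
    _ = (pvDs hand).flatMap
          (fun k => (PySem.Set.ofList (hand.map pvRank)).filter (fun c => c == k)) := hcore
    _ = (pvDs hand).flatMap (fun k => [k]) := List.flatMap_congr hsingle
    _ = pvDs hand := by simp

lemma pv_seq_eq (hand : List Int) :
    PySem.List.sorted2 hand
      (fun c => (hand.foldl (fun d c =>
          d.insert (PySem.Int.mod c 13) (d.getD (PySem.Int.mod c 13) 0 + 1))
          (PySem.Dict.empty : PySem.Dict Int Int)).getD (PySem.Int.mod c 13) 0)
      (fun c => PySem.Int.mod c 13) true
      = (pvDs hand).flatMap (pvBucket hand) := by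
  have hcnt : ∀ r : Int,
      (hand.foldl (fun d c =>
          d.insert (PySem.Int.mod c 13) (d.getD (PySem.Int.mod c 13) 0 + 1))
          (PySem.Dict.empty : PySem.Dict Int Int)).getD r 0 = pvW hand r := by
    intro r
    have hfold : (hand.map pvRank).foldl
        (fun (d : PySem.Dict Int Int) (x : Int) => d.insert x (d.getD x 0 + 1))
        PySem.Dict.empty
        = hand.foldl (fun d c =>
            d.insert (PySem.Int.mod c 13) (d.getD (PySem.Int.mod c 13) 0 + 1))
            (PySem.Dict.empty : PySem.Dict Int Int) := by
      rw [List.foldl_map]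
      rfl
    rw [← hfold, PySem.Dict.getD_foldl_insert_add_one]
    simp [pvW]
  have hcore : PySem.List.sorted2 hand
      (fun c => pvW hand (pvRank c)) (fun c => pvRank c) true
      = (pvDs hand).flatMap (fun k => hand.filter (fun c => pvRank c == k)) :=
    pv_core (pvW hand) pvRank (pvDs hand) (pv_ds_nodup hand) (pv_ds_desc hand) hand
      (fun c hc => (pv_ds_mem hand (pvRank c)).mpr (List.mem_map.mpr ⟨c, hc, rfl⟩))
  calc PySem.List.sorted2 hand
        (fun c => (hand.foldl (fun d c =>
            d.insert (PySem.Int.mod c 13) (d.getD (PySem.Int.mod c 13) 0 + 1))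
            (PySem.Dict.empty : PySem.Dict Int Int)).getD (PySem.Int.mod c 13) 0)
        (fun c => PySem.Int.mod c 13) true
      = PySem.List.sorted2 hand
          (fun c => pvW hand (pvRank c)) (fun c => pvRank c) true :=
        congrArg (fun k1 : Int → Int => PySem.List.sorted2 hand k1
            (fun c => PySem.Int.mod c 13) true)
          (funext (fun c => hcnt (PySem.Int.mod c 13)))
    _ = (pvDs hand).flatMap (fun k => hand.filter (fun c => pvRank c == k)) := hcore
    _ = (pvDs hand).flatMap (pvBucket hand) := rfl

lemma pv_flat_perm (hand : List Int) : ((pvDs hand).flatMap (pvBucket hand)).Perm hand := by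
  have h := pv_seq_eq hand
  rw [← h]
  exact PySem.List.sorted2_perm hand _ _ true

-- ===== VERDICT (by name: the statement is the Claim_ definition above) =====
theorem bestOfAKind_spec : Claim_equal_bestOfAKind := by
  intro hand _ hpre
  unfold Spec_bestOfAKind
  have hpre' : 5 ≤ hand.length := hpre
  have hflatlen : ((pvDs hand).flatMap (pvBucket hand)).length = hand.length :=
    (pv_flat_perm hand).length_eq
  simp only [bestOfAKind, bestOfAKind_alt]
  rw [pv_ranks_eq, pv_seq_eq]
  rw [pv_goRanks_spec (pvRankDict hand) (pvDs hand) [] (by simp)]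
  have hbkts : (pvDs hand).flatMap (fun r => (pvRankDict hand).getD r [])
      = (pvDs hand).flatMap (pvBucket hand) :=
    List.flatMap_congr (fun r _ => pv_bucket hand r)
  rw [hbkts]
  rw [if_pos (by simp only [List.length_nil, Nat.zero_add]; omega)]
  rw [if_neg (by omega)]
  rw [PySem.List.slice_to _ (by norm_num), PySem.List.slice?_none_none_neg_one]
  simp
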